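-- pv_equiv track=rewrite | github.com/posty934/agentic_EMR_System | agentic_EMR_System_v11/agents/agent3_reviewer.py | _classify_kg_repair_gate
-- ===== SOURCE A (Python) =====
-- def _classify_kg_repair_gate(kg_issues):
--     """
--     基于 KG 高严重度问题，判断当前场景属于：
--     1. pure_auto_fix: 结构化事实已足够，只是草稿违背事实，可直接自动修
--     2. need_user_input: 结构化事实本身不足/冲突，必须追问患者
--     3. no_high_issue: KG 无高严重度问题
--     """
--     high_issues = [x for x in kg_issues if x.get("severity") == "high"]
--
--     if not high_issues:
--         return "no_high_issue"
--
--     high_modes = {x.get("repair_mode") for x in high_issues}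
--
--     if high_modes == {"auto_fix"}:
--         return "pure_auto_fix"
--
--     return "need_user_input"
-- ===== SOURCE B (Python) =====
-- def _classify_kg_repair_gate(kg_issues):
--     # Each issue maps to a severity rank; the gate is the label of the worst rank.
--     labels = ("no_high_issue", "pure_auto_fix", "need_user_input")
--
--     def _rank(x):
--         if x.get("severity") != "high":
--             return 0
--         return 1 if x.get("repair_mode") == "auto_fix" else 2
--
--     return labels[max(map(_rank, kg_issues), default=0)]
-- ===== Notes on version B (the rewrite author's own statement) =====
-- stated objective: alternative
-- what changed: Replaces A's filter-then-set-equality logic by a rank-maximum reduction: each issue is mapped to a numeric rank (0 non-high, 1 high auto_fix, 2 high non-auto), the maximum rank is taken, and the result is looked up in a label table.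
import Mathlib
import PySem

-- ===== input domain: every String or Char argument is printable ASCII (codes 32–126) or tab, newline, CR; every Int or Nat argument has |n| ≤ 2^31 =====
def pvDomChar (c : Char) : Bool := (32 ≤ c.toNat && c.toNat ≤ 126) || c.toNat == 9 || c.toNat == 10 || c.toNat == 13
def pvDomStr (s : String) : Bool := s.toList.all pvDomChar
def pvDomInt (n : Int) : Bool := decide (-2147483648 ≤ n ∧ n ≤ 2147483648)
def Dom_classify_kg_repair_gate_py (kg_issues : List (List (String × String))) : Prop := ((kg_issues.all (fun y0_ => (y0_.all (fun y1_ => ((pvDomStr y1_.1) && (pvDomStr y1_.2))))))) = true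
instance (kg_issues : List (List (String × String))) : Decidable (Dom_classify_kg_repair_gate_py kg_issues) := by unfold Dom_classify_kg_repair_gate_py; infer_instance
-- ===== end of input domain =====

-- B replaces A's filter + mode-set-vs-{"auto_fix"} logic by a rank-maximum reduction
-- (each issue → rank 0/1/2, take the max, index a label table); objective: alternative.

-- ===== PORT A =====
def classify_kg_repair_gate_py (kg_issues : List (List (String × String))) : String :=
  let high_issues := kg_issues.filter (fun x => List.lookup "severity" x == some "high")
  if high_issues.isEmpty then "no_high_issue"
  else
    let high_modes : PySem.Set (Option String) :=
      PySem.Set.ofList (high_issues.map (fun x => List.lookup "repair_mode" x))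
    if PySem.Set.equal high_modes (PySem.Set.ofList [some "auto_fix"]) then "pure_auto_fix"
    else "need_user_input"

-- ===== PORT B =====
def pvRank (x : List (String × String)) : Nat :=
  if List.lookup "severity" x != some "high" then 0
  else if List.lookup "repair_mode" x == some "auto_fix" then 1 else 2

-- max(map(_rank, kg_issues), default=0) ported as a fold of Nat.max from 0 (exact: ranks are ≥ 0)
def classify_kg_repair_gate_py_alt (kg_issues : List (List (String × String))) : String :=
  let labels := ["no_high_issue", "pure_auto_fix", "need_user_input"]
  labels.getD ((kg_issues.map pvRank).foldl Nat.max 0) ""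

-- ===== PRECONDITION & SPEC =====
def Spec_classify_kg_repair_gate_py (kg_issues : List (List (String × String))) (out : String) : Prop := out = classify_kg_repair_gate_py_alt kg_issues
instance (kg_issues : List (List (String × String))) (out : String) : Decidable (Spec_classify_kg_repair_gate_py kg_issues out) := by unfold Spec_classify_kg_repair_gate_py; infer_instance

-- ===== CLAIM (what is proved, stated in full; the proofs are below) =====
def Claim_equal_classify_kg_repair_gate_py : Prop := ∀ (kg_issues : List (List (String × String))), Dom_classify_kg_repair_gate_py kg_issues → Spec_classify_kg_repair_gate_py kg_issues (classify_kg_repair_gate_py kg_issues)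

-- ===== LEMMAS AND PROOFS =====

-- the worst rank of a list, expressed via A's filter
def pvGate (l : List (List (String × String))) : Nat :=
  let F := l.filter (fun x => List.lookup "severity" x == some "high")
  if F.isEmpty then 0
  else if F.all (fun x => List.lookup "repair_mode" x == some "auto_fix") then 1 else 2

theorem pv_foldl_max_gate (l : List (List (String × String))) (m : Nat) :
    (l.map pvRank).foldl Nat.max m = Nat.max m (pvGate l) := by
  induction l generalizing m with
  | nil => simp [pvGate]
  | cons x l ih =>
    simp only [List.map_cons, List.foldl_cons, ih, Nat.max_assoc]
    congr 1
    unfold pvGate pvRank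
    rw [List.filter_cons]
    by_cases h : (List.lookup "severity" x == some "high") = true
    · by_cases h2 : (List.lookup "repair_mode" x == some "auto_fix") = true <;>
      by_cases h3 : ((l.filter (fun x => List.lookup "severity" x == some "high")).isEmpty) = true <;>
      by_cases h4 : ((l.filter (fun x => List.lookup "severity" x == some "high")).all
          (fun x => List.lookup "repair_mode" x == some "auto_fix")) = true <;>
      simp_all [bne, List.isEmpty_iff] <;>
      (split_ifs <;> simp_all)
    · by_cases h3 : ((l.filter (fun x => List.lookup "severity" x == some "high")).isEmpty) = true <;>
      by_cases h4 : ((l.filter (fun x => List.lookup "severity" x == some "high")).all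
          (fun x => List.lookup "repair_mode" x == some "auto_fix")) = true <;>
      simp_all [bne, List.isEmpty_iff]

theorem classify_kg_repair_gate_py_spec_aux :
    ∀ kg_issues, classify_kg_repair_gate_py kg_issues = classify_kg_repair_gate_py_alt kg_issues := by
  intro kg_issues
  unfold classify_kg_repair_gate_py classify_kg_repair_gate_py_alt
  rw [pv_foldl_max_gate]
  unfold pvGate
  set F := kg_issues.filter (fun x => List.lookup "severity" x == some "high") with hF
  by_cases hE : F.isEmpty
  · simp [hE]
  · by_cases hall : (F.all (fun x => List.lookup "repair_mode" x == some "auto_fix")) = true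
    · have heq : PySem.Set.equal
          (PySem.Set.ofList (F.map (fun x => List.lookup "repair_mode" x)))
          (PySem.Set.ofList [some "auto_fix"]) = true := by
        rw [PySem.Set.equal_iff _ _]
        intro m
        simp only [PySem.Set.mem_ofList, List.mem_map, List.mem_singleton]
        constructor
        · rintro ⟨x, hx, rfl⟩
          exact beq_iff_eq.mp (List.all_eq_true.mp hall x hx)
        · rintro rfl
          obtain ⟨y, hy⟩ : ∃ y, y ∈ F :=
            List.exists_mem_of_ne_nil F (by simpa [List.isEmpty_iff] using hE)
          exact ⟨y, hy, beq_iff_eq.mp (List.all_eq_true.mp hall y hy)⟩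
      simp [hE, hall, heq]
    · have hne : ¬ (PySem.Set.equal
          (PySem.Set.ofList (F.map (fun x => List.lookup "repair_mode" x)))
          (PySem.Set.ofList [some "auto_fix"]) = true) := by
        intro hcon
        apply hall
        rw [List.all_eq_true]
        intro x hx
        have := ((PySem.Set.equal_iff _ _).mp hcon (List.lookup "repair_mode" x)).mp
        simp only [PySem.Set.mem_ofList, List.mem_map, List.mem_singleton] at this
        exact beq_iff_eq.mpr (this ⟨x, hx, rfl⟩)
      simp [hE, hall, hne]

-- ===== VERDICT (by name: the statement is the Claim_ definition above) =====
theorem classify_kg_repair_gate_py_spec : Claim_equal_classify_kg_repair_gate_py := by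
  intro kg_issues _
  exact classify_kg_repair_gate_py_spec_aux kg_issues
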